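-- pv_equiv track=rewrite | github.com/PatrickRedStar/phantom-vpn | phantom-vpn/scripts/keys.py | next_tun_addr
-- ===== SOURCE A (Python) =====
-- def next_tun_addr(clients):
--     used = set()
--     for item in clients.values():
--         tun_addr = item.get("tun_addr", "")
--         ip = tun_addr.split("/", 1)[0]
--         octets = ip.split(".")
--         if len(octets) == 4 and octets[0] == "10" and octets[1] == "7" and octets[2] == "0":
--             try:
--                 used.add(int(octets[3]))
--             except ValueError:
--                 pass
--     for host in range(2, 255):
--         if host not in used:
--             return f"10.7.0.{host}/24"
--     raise RuntimeError("No free tunnel addresses left in 10.7.0.0/24")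
-- ===== SOURCE B (Python) =====
-- def next_tun_addr(clients):
--     used = []
--     for item in clients.values():
--         tun_addr = item.get("tun_addr", "")
--         ip = tun_addr.split("/", 1)[0]
--         octets = ip.split(".")
--         if len(octets) == 4 and octets[0] == "10" and octets[1] == "7" and octets[2] == "0":
--             try:
--                 used.append(int(octets[3]))
--             except ValueError:
--                 pass
--     expected = 2
--     for v in sorted(used):
--         if v > expected:
--             break
--         if v == expected:
--             expected += 1
--     if expected < 255:
--         return f"10.7.0.{expected}/24"
--     raise RuntimeError("No free tunnel addresses left in 10.7.0.0/24")
-- ===== Notes on version B (the rewrite author's own statement) =====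
-- stated objective: alternative
-- what changed: Replaces A's scan over range(2,255) with a set-membership test per host by a single gap-walk over the sorted list of used final octets that advances an 'expected' counter past consecutive used values.
import Mathlib
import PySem

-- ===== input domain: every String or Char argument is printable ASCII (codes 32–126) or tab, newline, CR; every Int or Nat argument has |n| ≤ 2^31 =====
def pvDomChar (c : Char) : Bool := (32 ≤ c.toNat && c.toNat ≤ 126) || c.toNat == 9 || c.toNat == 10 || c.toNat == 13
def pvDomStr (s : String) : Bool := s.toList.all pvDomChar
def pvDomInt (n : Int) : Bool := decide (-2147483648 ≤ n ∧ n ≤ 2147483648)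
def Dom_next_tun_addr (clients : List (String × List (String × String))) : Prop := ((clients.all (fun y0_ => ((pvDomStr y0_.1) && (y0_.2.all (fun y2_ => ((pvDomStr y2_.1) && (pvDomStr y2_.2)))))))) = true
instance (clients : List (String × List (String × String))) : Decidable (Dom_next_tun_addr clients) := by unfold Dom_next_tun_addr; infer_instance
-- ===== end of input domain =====

-- B replaces A's scan over range(2,255) with membership tests by a sorted gap-walk over the used octets; return values proved equal on Pre_ (outside it both Pythons raise the same RuntimeError).

-- shared helper (the two Pythons' parsing loop bodies are the identical code): the final
-- octet one item contributes to 'used', if any (none = wrong shape/prefix, or ValueError)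
def itemOctet (item : List (String × String)) : Option Int :=
  let tun_addr := PySem.Dict.getD (PySem.Dict.ofList item) "tun_addr" ""
  let ip := PySem.List.pyGetD ((PySem.Str.splitMax? tun_addr "/" 1).getD []) 0 ""
  let octets := (PySem.Str.split? ip ".").getD []
  if octets.length == 4 && (PySem.List.pyGetD octets 0 "" == "10")
      && (PySem.List.pyGetD octets 1 "" == "7") && (PySem.List.pyGetD octets 2 "" == "0") then
    PySem.Int.ofStr? (PySem.List.pyGetD octets 3 "")
  else none

-- ===== PORT A =====
def usedA (clients : List (String × List (String × String))) : PySem.Set Int :=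
  clients.foldl (fun u kv =>
    match itemOctet kv.2 with
    | some n => PySem.Set.add u n
    | none => u) PySem.Set.empty

-- 'for host in range(2,255): if host not in used: return …' ("" stands for the RuntimeError path, excluded by Pre_)
def loopA : List Int → PySem.Set Int → String
  | [], _ => ""
  | h :: t, u => if h ∈ u then loopA t u else "10.7.0." ++ PySem.Int.toStr h ++ "/24"

def next_tun_addr (clients : List (String × List (String × String))) : String :=
  loopA (PySem.List.pyRange 2 255 1) (usedA clients)

-- ===== PORT B =====
def usedB (clients : List (String × List (String × String))) : List Int :=
  clients.foldl (fun u kv =>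
    match itemOctet kv.2 with
    | some n => u ++ [n]
    | none => u) []

-- 'for v in sorted(used): if v > expected: break; if v == expected: expected += 1'
def walkB : List Int → Int → Int
  | [], e => e
  | v :: t, e => if e < v then e else if v = e then walkB t (e + 1) else walkB t e

def next_tun_addr_alt (clients : List (String × List (String × String))) : String :=
  let expected := walkB (PySem.List.sorted (usedB clients) (fun x => x) false) 2
  if expected < 255 then "10.7.0." ++ PySem.Int.toStr expected ++ "/24" else ""

-- ===== PRECONDITION & SPEC =====
-- Pre_: some host in 2..254 is claimed by no client — exactly where Python A returns
-- (outside it A raises RuntimeError "No free tunnel addresses left…", and B raises the same).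
def Pre_next_tun_addr (clients : List (String × List (String × String))) : Prop :=
  ∃ h ∈ PySem.List.pyRange 2 255 1, ∀ kv ∈ clients, itemOctet kv.2 ≠ some h
instance (clients : List (String × List (String × String))) : Decidable (Pre_next_tun_addr clients) := by unfold Pre_next_tun_addr; infer_instance

def pvWitness_next_tun_addr : (List (String × List (String × String))) :=
  [("alice", [("tun_addr", "10.7.0.3/24")]), ("bob", [("tun_addr", "10.7.0.4/24")])]

def Spec_next_tun_addr (clients : List (String × List (String × String))) (out : String) : Prop := out = next_tun_addr_alt clients
instance (clients : List (String × List (String × String))) (out : String) : Decidable (Spec_next_tun_addr clients out) := by unfold Spec_next_tun_addr; infer_instance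

-- ===== CLAIM (what is proved, stated in full; the proofs are below) =====
def Claim_equal_next_tun_addr : Prop := ∀ (clients : List (String × List (String × String))), Dom_next_tun_addr clients → Pre_next_tun_addr clients → Spec_next_tun_addr clients (next_tun_addr clients)

-- ===== LEMMAS AND PROOFS =====

lemma loopA_cons (h : Int) (t : List Int) (u : PySem.Set Int) :
    loopA (h :: t) u = if h ∈ u then loopA t u else "10.7.0." ++ PySem.Int.toStr h ++ "/24" := rfl

lemma walkB_cons (v : Int) (t : List Int) (e : Int) :
    walkB (v :: t) e = if e < v then e else if v = e then walkB t (e + 1) else walkB t e := rfl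

-- A's set fold: membership = some client contributes that octet
lemma mem_foldA (l : List (String × List (String × String))) (s : PySem.Set Int) (x : Int) :
    x ∈ l.foldl (fun u kv =>
      match itemOctet kv.2 with
      | some n => PySem.Set.add u n
      | none => u) s ↔ x ∈ s ∨ ∃ kv ∈ l, itemOctet kv.2 = some x := by
  induction l generalizing s with
  | nil => simp
  | cons kv t ih =>
    simp only [List.foldl_cons, List.mem_cons]
    cases h : itemOctet kv.2 with
    | none =>
      rw [ih]
      constructor
      · rintro (hs | ⟨kv', hkv', hoct⟩)
        · exact Or.inl hs
        · exact Or.inr ⟨kv', Or.inr hkv', hoct⟩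
      · rintro (hs | ⟨kv', (rfl | hkv'), hoct⟩)
        · exact Or.inl hs
        · rw [h] at hoct; cases hoct
        · exact Or.inr ⟨kv', hkv', hoct⟩
    | some n =>
      rw [ih]
      simp only [PySem.Set.mem_add]
      constructor
      · rintro (⟨hs | rfl⟩ | ⟨kv', hkv', hoct⟩)
        · exact Or.inl hs
        · exact Or.inr ⟨kv, Or.inl rfl, h⟩
        · exact Or.inr ⟨kv', Or.inr hkv', hoct⟩
      · rintro (hs | ⟨kv', (rfl | hkv'), hoct⟩)
        · exact Or.inl (Or.inl hs)
        · rw [h] at hoct; exact Or.inl (Or.inr (Option.some_injective _ hoct).symm)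
        · exact Or.inr ⟨kv', hkv', hoct⟩

-- B's list fold is an append of the filterMap of contributions
lemma foldB_eq (l : List (String × List (String × String))) (acc : List Int) :
    l.foldl (fun u kv =>
      match itemOctet kv.2 with
      | some n => u ++ [n]
      | none => u) acc = acc ++ l.filterMap (fun kv => itemOctet kv.2) := by
  induction l generalizing acc with
  | nil => simp
  | cons kv t ih =>
    simp only [List.foldl_cons, List.filterMap_cons]
    cases h : itemOctet kv.2 with
    | none => rw [ih]
    | some n => rw [ih]; simp

-- walkB at a value not in the list returns it unchanged
lemma walkB_of_not_mem (s : List Int) (e : Int) (h : e ∉ s) : walkB s e = e := by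
  induction s with
  | nil => rfl
  | cons v t ih =>
    simp only [List.mem_cons, not_or] at h
    rw [walkB_cons]
    by_cases hlt : e < v
    · rw [if_pos hlt]
    · rw [if_neg hlt, if_neg (fun hh => h.1 hh.symm), ih h.2]

-- walkB never goes below its counter
lemma le_walkB (s : List Int) (e : Int) : e ≤ walkB s e := by
  induction s generalizing e with
  | nil => exact le_refl e
  | cons v t ih =>
    rw [walkB_cons]
    split_ifs with h1 h2
    · exact le_refl e
    · have := ih (e + 1); omega
    · exact ih e

-- on a (≤)-sorted list, walkB steps past a member of the list
lemma walkB_succ_of_mem (s : List Int) (a : Int) (hs : s.Pairwise (· ≤ ·)) (ha : a ∈ s) :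
    walkB s a = walkB s (a + 1) := by
  induction s with
  | nil => cases ha
  | cons v t ih =>
    rw [List.pairwise_cons] at hs
    rw [walkB_cons, walkB_cons]
    by_cases hv : v = a
    · subst hv
      rw [if_neg (lt_irrefl v), if_pos rfl, if_neg (by omega), if_neg (by omega)]
    · have hat : a ∈ t := by
        rcases List.mem_cons.1 ha with rfl | hat
        · exact absurd rfl hv
        · exact hat
      have hva : v < a := lt_of_le_of_ne (hs.1 a hat) hv
      rw [if_neg (by omega), if_neg hv, if_neg (by omega), if_neg (by omega),
        ih hs.2 hat]

-- the central bridge: A's range scan equals B's gap walk, for any set/list with equal membership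
lemma loopA_eq_walkB (n : Nat) : ∀ (a : Int) (u : PySem.Set Int) (s : List Int),
    (∀ x, x ∈ u ↔ x ∈ s) → s.Pairwise (· ≤ ·) →
    loopA (PySem.List.pyRange a (a + n) 1) u =
      (if walkB s a < a + n then "10.7.0." ++ PySem.Int.toStr (walkB s a) ++ "/24" else "") := by
  induction n with
  | zero =>
    intro a u s hm hp
    rw [PySem.List.pyRange_one_eq_nil (by omega)]
    have := le_walkB s a
    rw [if_neg (by push_cast; omega)]
    rfl
  | succ k ih =>
    intro a u s hm hp
    rw [PySem.List.pyRange_one_cons (by push_cast; omega), loopA_cons]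
    by_cases hmem : a ∈ u
    · have has : a ∈ s := (hm a).1 hmem
      have hbb : a + ((k + 1 : Nat) : Int) = (a + 1) + ((k : Nat) : Int) := by push_cast; ring
      rw [if_pos hmem, hbb, ih (a + 1) u s hm hp, walkB_succ_of_mem s a hp has]
    · have has : a ∉ s := fun h => hmem ((hm a).2 h)
      rw [if_neg hmem, walkB_of_not_mem s a has, if_pos (by push_cast; omega)]

-- ===== VERDICT (by name: the statement is the Claim_ definition above) =====
theorem next_tun_addr_spec : Claim_equal_next_tun_addr := by
  intro clients _ _
  show next_tun_addr clients = next_tun_addr_alt clients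
  have hmemL : ∀ x, x ∈ usedB clients ↔ ∃ kv ∈ clients, itemOctet kv.2 = some x := by
    intro x
    rw [usedB, foldB_eq, List.nil_append, List.mem_filterMap]
  have hmem : ∀ x, x ∈ usedA clients ↔
      x ∈ PySem.List.sorted (usedB clients) (fun x => x) false := by
    intro x
    rw [usedA, mem_foldA, PySem.List.mem_sorted, hmemL]
    simp [PySem.Set.empty]
  have hpair : (PySem.List.sorted (usedB clients) (fun x => x) false).Pairwise (· ≤ ·) :=
    PySem.List.sorted_pairwise (usedB clients) (fun x => x)
  have h := loopA_eq_walkB 253 2 (usedA clients)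
    (PySem.List.sorted (usedB clients) (fun x => x) false) hmem hpair
  norm_num at h
  rw [next_tun_addr, h]
  rfl

-- the witness satisfies Dom and Pre
theorem pvWitness_ok : Dom_next_tun_addr pvWitness_next_tun_addr ∧ Pre_next_tun_addr pvWitness_next_tun_addr := by
  constructor <;> decide
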